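-- pv_equiv track=rewrite | github.com/alac/txt_to_dataset | library/few_shot_request.py | parse_few_shot_format
-- ===== SOURCE A (Python) =====
-- def parse_few_shot_format(prompt) -> list[dict]:
--     example = {}
--     all_examples = [example]
--     last_key = None
--     for line in prompt.splitlines():
--         if len(line.strip()) == 0:
--             if len(example.keys()):
--                 example = {}
--                 all_examples.append(example)
--                 last_key = None
--         elif line.startswith(">") and ":" in line:
--             line = line[1:]
--             key, value = line.split(":", 1)
--             last_key = key.strip()
--             if value.startswith(" "):
--                 value = value[1:]
--             example[last_key] = value
--         elif last_key is not None:
--             example[last_key] += "\n" + line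
--     all_examples = [d for d in all_examples if d]
--     return all_examples
-- ===== SOURCE B (Python) =====
-- def _parse_block(lines):
--     d = {}
--     last_key = None
--     for line in lines:
--         if line.startswith(">") and ":" in line:
--             rest = line[1:]
--             key, value = rest.split(":", 1)
--             last_key = key.strip()
--             if value.startswith(" "):
--                 value = value[1:]
--             d[last_key] = value
--         elif last_key is not None:
--             d[last_key] += "\n" + line
--     return d
--
--
-- def parse_few_shot_format(prompt) -> list[dict]:
--     blocks = []
--     cur = []
--     for line in prompt.splitlines():
--         if line.strip() == "":
--             if cur:
--                 blocks.append(cur)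
--                 cur = []
--         else:
--             cur.append(line)
--     if cur:
--         blocks.append(cur)
--     dicts = [_parse_block(b) for b in blocks]
--     return [d for d in dicts if d]
-- ===== Notes on version B (the rewrite author's own statement) =====
-- stated objective: alternative
-- what changed: Replaces A's one-pass state machine (which mutates a shared current dict already appended to the growing result list) by a two-phase decomposition: first split the lines into blank-separated blocks, then parse each block independently into a dict and keep the non-empty ones.
import Mathlib
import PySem

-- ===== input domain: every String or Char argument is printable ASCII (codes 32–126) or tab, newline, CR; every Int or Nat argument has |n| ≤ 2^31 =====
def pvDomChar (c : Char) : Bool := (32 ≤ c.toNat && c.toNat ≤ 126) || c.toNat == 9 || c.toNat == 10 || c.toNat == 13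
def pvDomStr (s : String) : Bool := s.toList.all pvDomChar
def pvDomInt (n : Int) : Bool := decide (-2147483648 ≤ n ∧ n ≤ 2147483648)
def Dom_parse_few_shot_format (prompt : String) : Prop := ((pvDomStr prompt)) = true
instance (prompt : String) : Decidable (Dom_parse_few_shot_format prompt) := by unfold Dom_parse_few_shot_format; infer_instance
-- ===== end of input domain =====

-- B is an alternative two-phase decomposition of A (split into blank-separated blocks, then
-- parse each block); same asymptotic cost, no speed claim.  Return value only (A mutates nothing).

-- ===== PORT A =====
-- Per-line key/continuation handling.  This code is textually identical in A's loop body and in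
-- B's _parse_block, so both ports share this transliteration of it.
-- The `_ => (ex, lk)` fallback of the match is unreachable (the guard ensures ":" occurs in the
-- line, so split(":", 1) yields two pieces); likewise Dict.modify is exact here because Python's
-- `example[last_key] += …` runs only when last_key was previously stored in the dict.
def pvLineStep (ex : PySem.Dict String String) (lk : Option String) (line : String) :
    PySem.Dict String String × Option String :=
  if PySem.Str.startswith line ">" && PySem.Str.isIn ":" line then
    match PySem.Str.splitMax? (PySem.Str.slice line (some 1) none) ":" 1 with
    | some (key :: value :: _) =>
        (ex.insert (PySem.Str.strip key)
          (if PySem.Str.startswith value " " then PySem.Str.slice value (some 1) none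
           else value),
         some (PySem.Str.strip key))
    | _ => (ex, lk)
  else
    match lk with
    | some k => (ex.modify k "" (fun v => v ++ "\n" ++ line), some k)
    | none => (ex, lk)

-- A's loop: `done` holds the completed dicts; the current `example` (aliased into all_examples
-- in the Python) is appended at the end.
def pfsA : List String → PySem.Dict String String → List (PySem.Dict String String) →
    Option String → List (PySem.Dict String String)
  | [], ex, done, _ => done ++ [ex]
  | line :: rest, ex, done, lk =>
    if PySem.Str.len (PySem.Str.strip line) == 0 then
      if ex.size != 0 then pfsA rest PySem.Dict.empty (done ++ [ex]) none
      else pfsA rest ex done lk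
    else
      let s := pvLineStep ex lk line
      pfsA rest s.1 done s.2

def parse_few_shot_format (prompt : String) : List (List (String × String)) :=
  ((pfsA (PySem.Str.splitlines prompt) PySem.Dict.empty [] none).filter
      (fun d => !d.items.isEmpty)).map PySem.Dict.items

-- ===== PORT B =====
-- Phase 1: split the lines into blank-separated blocks (accumulating `cur`, flushing on blanks).
def pfsSplit : List String → List String → List (List String) → List (List String)
  | [], cur, blocks => if cur.isEmpty then blocks else blocks ++ [cur]
  | line :: rest, cur, blocks =>
    if PySem.Str.strip line == "" then
      if cur.isEmpty then pfsSplit rest cur blocks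
      else pfsSplit rest [] (blocks ++ [cur])
    else pfsSplit rest (cur ++ [line]) blocks

-- Phase 2: _parse_block — fold the shared per-line step over one block.
def pfsParseBlock (b : List String) : PySem.Dict String String :=
  (b.foldl (fun s line => pvLineStep s.1 s.2 line) (PySem.Dict.empty, none)).1

def parse_few_shot_format_alt (prompt : String) : List (List (String × String)) :=
  (((pfsSplit (PySem.Str.splitlines prompt) [] []).map pfsParseBlock).filter
      (fun d => !d.items.isEmpty)).map PySem.Dict.items

-- ===== PRECONDITION & SPEC =====
def Spec_parse_few_shot_format (prompt : String) (out : List (List (String × String))) : Prop := out = parse_few_shot_format_alt prompt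
instance (prompt : String) (out : List (List (String × String))) : Decidable (Spec_parse_few_shot_format prompt out) := by unfold Spec_parse_few_shot_format; infer_instance

-- ===== CLAIM (what is proved, stated in full; the proofs are below) =====
def Claim_equal_parse_few_shot_format : Prop := ∀ (prompt : String), Dom_parse_few_shot_format prompt → Spec_parse_few_shot_format prompt (parse_few_shot_format prompt)

-- ===== LEMMAS AND PROOFS =====

-- the fold state reached after consuming the lines of `cur`
def pfsState (cur : List String) : PySem.Dict String String × Option String :=
  cur.foldl (fun s line => pvLineStep s.1 s.2 line) (PySem.Dict.empty, none)

-- A-side post-processing (drop empty dicts, project to items)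
def pfsOut (ds : List (PySem.Dict String String)) : List (List (String × String)) :=
  (ds.filter (fun d => !d.items.isEmpty)).map PySem.Dict.items

theorem pfsOut_append (xs ys : List (PySem.Dict String String)) :
    pfsOut (xs ++ ys) = pfsOut xs ++ pfsOut ys := by
  simp [pfsOut, List.filter_append]

theorem pfs_insert_items_ne (d : PySem.Dict String String) (k v : String) :
    (d.insert k v).items ≠ [] := by
  intro he
  have h := PySem.Dict.mem_items_insert_self d k v
  rw [he] at h; simp at h

theorem pfs_modify_items_ne (d : PySem.Dict String String) (k d0 : String)
    (f : String → String) : (d.modify k d0 f).items ≠ [] := by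
  intro he
  have h : (d.modify k d0 f).contains k = true := by
    rw [PySem.Dict.contains_modify]; simp
  rw [PySem.Dict.contains_iff_mem_keys] at h
  simp [PySem.Dict.keys, he] at h

theorem pvLineStep_inv (ex : PySem.Dict String String) (lk : Option String) (line : String)
    (h : ex.items = [] → lk = none) :
    (pvLineStep ex lk line).1.items = [] → (pvLineStep ex lk line).2 = none := by
  unfold pvLineStep
  split
  · split
    · intro h1; exact absurd h1 (pfs_insert_items_ne _ _ _)
    · exact h
  · cases lk with
    | some k => intro h1; exact absurd h1 (pfs_modify_items_ne _ _ _ _)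
    | none => exact h

theorem pfs_foldl_inv (cur : List String) (s : PySem.Dict String String × Option String)
    (h : s.1.items = [] → s.2 = none) :
    (cur.foldl (fun s line => pvLineStep s.1 s.2 line) s).1.items = [] →
      (cur.foldl (fun s line => pvLineStep s.1 s.2 line) s).2 = none := by
  induction cur generalizing s with
  | nil => exact h
  | cons line rest ih => exact ih _ (pvLineStep_inv _ _ _ h)

theorem pfsState_inv (cur : List String) :
    (pfsState cur).1.items = [] → (pfsState cur).2 = none := by
  exact pfs_foldl_inv cur _ (by intro; rfl)

theorem pfsState_append (cur : List String) (line : String) :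
    pfsState (cur ++ [line]) = pvLineStep (pfsState cur).1 (pfsState cur).2 line := by
  simp [pfsState, List.foldl_append]

theorem pfsState_nil_eq : pfsState [] = (PySem.Dict.empty, none) := rfl

theorem pfsSplit_accum (lines : List String) (cur : List String) (blocks : List (List String)) :
    pfsSplit lines cur blocks = blocks ++ pfsSplit lines cur [] := by
  induction lines generalizing cur blocks with
  | nil => unfold pfsSplit; split <;> simp
  | cons line rest ih =>
    unfold pfsSplit
    split
    · split
      · exact ih _ _
      · rw [ih _ (blocks ++ [cur]), ih _ ([] ++ [cur])]; simp
    · exact ih _ _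

theorem pfs_blank_iff (line : String) :
    (PySem.Str.len (PySem.Str.strip line) == 0) = (PySem.Str.strip line == "") := by
  rw [Bool.eq_iff_iff]
  simp only [beq_iff_eq, PySem.Str.len_eq]
  simp [List.length_eq_zero_iff, ← String.toList_inj]

theorem pfs_main (lines cur : List String) (done : List (PySem.Dict String String)) :
    pfsOut (pfsA lines (pfsState cur).1 done (pfsState cur).2)
      = pfsOut done ++ pfsOut ((pfsSplit lines cur []).map pfsParseBlock) := by
  induction lines generalizing cur done with
  | nil =>
    unfold pfsA pfsSplit
    by_cases hc : cur.isEmpty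
    · rw [List.isEmpty_iff] at hc
      subst hc
      simp [pfsOut, pfsState_nil_eq, PySem.Dict.empty]
    · rw [if_neg (by simpa using hc), pfsOut_append]
      simp [pfsParseBlock, pfsState, pfsOut]
  | cons line rest ih =>
    unfold pfsA pfsSplit
    rw [pfs_blank_iff line]
    by_cases hb : PySem.Str.strip line == ""
    · rw [if_pos hb, if_pos hb]
      by_cases hsz : (pfsState cur).1.size != 0
      · -- flush: the current dict is non-empty, hence cur ≠ []
        have hcne : ¬ cur.isEmpty := by
          intro hce
          rw [List.isEmpty_iff] at hce
          subst hce
          simp [pfsState_nil_eq, PySem.Dict.size, PySem.Dict.empty] at hsz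
        rw [if_pos hsz, if_neg hcne]
        have h1 : pfsA rest PySem.Dict.empty (done ++ [(pfsState cur).1]) none
            = pfsA rest (pfsState []).1 (done ++ [(pfsState cur).1]) (pfsState []).2 := rfl
        rw [h1, ih [] (done ++ [(pfsState cur).1])]
        simp only [List.nil_append]
        rw [pfsSplit_accum rest [] [cur], pfsOut_append, List.map_append, pfsOut_append]
        simp [pfsParseBlock, pfsState]
      · -- the current dict is empty, hence last_key is None too
        rw [if_neg hsz]
        have hemp : (pfsState cur).1.items = [] := by
          simp [PySem.Dict.size, bne] at hsz
          exact hsz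
        have hlk : (pfsState cur).2 = none := pfsState_inv cur hemp
        have hst : pfsState cur = (PySem.Dict.empty, none) := by
          have : (pfsState cur).1 = PySem.Dict.empty := by
            apply PySem.Dict.ext; simpa [PySem.Dict.empty] using hemp
          rw [Prod.ext_iff]; exact ⟨this, hlk⟩
        by_cases hc : cur.isEmpty
        · rw [if_pos hc]
          exact ih cur done
        · rw [if_neg hc]
          have h1 : pfsA rest (pfsState cur).1 done (pfsState cur).2
              = pfsA rest (pfsState []).1 done (pfsState []).2 := by rw [hst]; rfl
          rw [h1, ih [] done]
          simp only [List.nil_append]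
          rw [pfsSplit_accum rest [] [cur], List.map_append, pfsOut_append]
          have hout : pfsOut ([cur].map pfsParseBlock) = [] := by
            simp [pfsOut, pfsParseBlock]
            simpa [pfsState] using hemp
          rw [hout]
          simp
    · rw [if_neg hb, if_neg hb]
      have h1 : pvLineStep (pfsState cur).1 (pfsState cur).2 line = pfsState (cur ++ [line]) :=
        (pfsState_append cur line).symm
      simp only [h1]
      exact ih (cur ++ [line]) done

-- ===== VERDICT (by name: the statement is the Claim_ definition above) =====
theorem parse_few_shot_format_spec : Claim_equal_parse_few_shot_format := by
  intro prompt _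
  unfold Spec_parse_few_shot_format
  have h := pfs_main (PySem.Str.splitlines prompt) [] []
  simpa [pfsState, pfsOut, parse_few_shot_format, parse_few_shot_format_alt, pfsSplit] using h
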